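-- pv_equiv track=rewrite | github.com/daniel-reich/ubiquitous-fiesta | 4xZFisQX8NnYB3nv4_5.py | maximum_seating
-- ===== SOURCE A (Python) =====
-- def maximum_seating(lst):
--     lst = [0,0] + lst + [0,0]
--     total = 0
--     for i in range(2,len(lst)-2):
--         if lst[i] == 0:
--             if all([lst[i + j] == 0 for j in [1,2,-1,-2]]):
--                 total += 1
--                 lst[i] = 1
--     return total
-- ===== SOURCE B (Python) =====
-- def maximum_seating(lst):
--     total = 0
--     k = 0        # length of the current run of empty seats
--     bounded = 0  # 1 if the current run is preceded by an occupant
--     for x in lst: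
--         if x != 0:
--             total += max(k - 2 * bounded, 0) // 3
--             k = 0
--             bounded = 1
--         else:
--             k += 1
--     return total + max(k + 2 - 2 * bounded, 0) // 3
-- ===== Notes on version B (the rewrite author's own statement) =====
-- stated objective: alternative
-- what changed: Replaces A's padded copy, in-place seat marking and per-seat 4-neighbour all()-list check by a single pass of run-length counting that adds a closed-form max(len+2-2*boundaries,0)//3 for each maximal run of empty seats.
import Mathlib
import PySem

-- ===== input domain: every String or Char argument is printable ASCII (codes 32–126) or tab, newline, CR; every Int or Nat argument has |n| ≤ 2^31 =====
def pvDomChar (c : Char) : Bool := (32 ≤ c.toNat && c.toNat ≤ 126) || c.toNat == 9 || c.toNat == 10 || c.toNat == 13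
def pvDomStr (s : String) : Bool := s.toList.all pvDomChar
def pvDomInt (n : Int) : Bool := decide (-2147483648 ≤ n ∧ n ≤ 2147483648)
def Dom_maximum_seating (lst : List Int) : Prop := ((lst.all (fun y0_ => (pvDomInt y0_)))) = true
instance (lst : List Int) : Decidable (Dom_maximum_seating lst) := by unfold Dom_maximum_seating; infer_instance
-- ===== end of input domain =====

-- B replaces A's padded copy, in-place marking and 4-neighbour all()-check by one
-- run-length pass with a closed-form count per maximal run of empty seats.

-- ===== PORT A =====
-- loop body of A: 'if lst[i] == 0 and all four neighbours == 0: total += 1; lst[i] = 1'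
-- (indices i, i±1, i±2 are always in range of the padded list, so pyGetD's default is never used;
--  'lst[i] = 1' at the nonnegative in-range index i is pySetD)
def stepA (st : List Int × Int) (i : Int) : List Int × Int :=
  if PySem.List.pyGetD st.1 i 0 = 0 then
    if ([1, 2, -1, -2] : List Int).all (fun j => PySem.List.pyGetD st.1 (i + j) 0 == 0) then
      (PySem.List.pySetD st.1 i 1, st.2 + 1)
    else st
  else st

def maximum_seating (lst : List Int) : Int :=
  let l : List Int := [0, 0] ++ lst ++ [0, 0]
  ((PySem.List.pyRange 2 ((l.length : Int) - 2) 1).foldl stepA (l, 0)).2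

-- ===== PORT B =====
-- loop body of B over (total, k, bounded): close the current zero-run on an occupant
def stepB (st : Int × Int × Int) (x : Int) : Int × Int × Int :=
  if x ≠ 0 then (st.1 + PySem.Int.floordiv (max (st.2.1 - 2 * st.2.2) 0) 3, 0, 1)
  else (st.1, st.2.1 + 1, st.2.2)

def maximum_seating_alt (lst : List Int) : Int :=
  let st := lst.foldl stepB (0, 0, 0)
  st.1 + PySem.Int.floordiv (max (st.2.1 + 2 - 2 * st.2.2) 0) 3

-- ===== PRECONDITION & SPEC =====
def Spec_maximum_seating (lst : List Int) (out : Int) : Prop := out = maximum_seating_alt lst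
instance (lst : List Int) (out : Int) : Decidable (Spec_maximum_seating lst out) := by unfold Spec_maximum_seating; infer_instance

-- ===== CLAIM (what is proved, stated in full; the proofs are below) =====
def Claim_equal_maximum_seating : Prop := ∀ (lst : List Int), Dom_maximum_seating lst → Spec_maximum_seating lst (maximum_seating lst)

-- ===== LEMMAS AND PROOFS =====

-- mediator: left-to-right greedy with a capped gap-since-last-occupant d and a 2-seat lookahead
def gcount : List Int → Nat → Int
  | [], _ => 0
  | x :: r, d =>
    if x ≠ 0 then gcount r 0
    else if 2 ≤ d ∧ r.headD 0 = 0 ∧ (r.drop 1).headD 0 = 0 then 1 + gcount r 0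
    else gcount r (min (d + 1) 2)

lemma getDk (front suf : List Int) (k : Nat) (d : Int) :
    PySem.List.pyGetD (front ++ suf) ((front.length : Int) + (k : Int)) d = suf.getD k d := by
  have h : ((front.length : Int) + (k : Int)) = ((front.length + k : Nat) : Int) := by push_cast; ring
  rw [h, PySem.List.pyGetD_natCast, List.getD_append_right front suf d _ (by omega)]
  congr 1
  omega

lemma getD_pad0 (r : List Int) : (r ++ [0, 0]).getD 0 (0 : Int) = r.headD 0 := by
  cases r <;> simp

lemma getD_pad1 (r : List Int) : (r ++ [0, 0]).getD 1 (0 : Int) = (r.drop 1).headD 0 := by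
  match r with
  | [] => simp
  | [y] => simp
  | y :: z :: t => simp

lemma set_shift2 (front : List Int) (a b x v : Int) (suf : List Int) :
    (front ++ a :: b :: x :: suf).set (front.length + 2) v = front ++ a :: b :: v :: suf := by
  induction front with
  | nil => simp
  | cons h t ih => simp [ih]

-- stepA at index front.length + 2 on the state shape maintained by the loop
lemma stepA_eval (front : List Int) (a b x : Int) (r : List Int) (t : Int) :
    stepA (front ++ a :: b :: x :: (r ++ [0, 0]), t) ((front.length : Int) + 2)
      = if x = 0 ∧ r.headD 0 = 0 ∧ (r.drop 1).headD 0 = 0 ∧ b = 0 ∧ a = 0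
        then (front ++ a :: b :: (1 : Int) :: (r ++ [0, 0]), t + 1)
        else (front ++ a :: b :: x :: (r ++ [0, 0]), t) := by
  have g2 := getDk front (a :: b :: x :: (r ++ [0, 0])) 2 0
  have g3 := getDk front (a :: b :: x :: (r ++ [0, 0])) 3 0
  have g4 := getDk front (a :: b :: x :: (r ++ [0, 0])) 4 0
  have g1 := getDk front (a :: b :: x :: (r ++ [0, 0])) 1 0
  have g0 := getDk front (a :: b :: x :: (r ++ [0, 0])) 0 0
  push_cast at g2 g3 g4 g1 g0
  have e3 : ((front.length : Int) + 2) + 1 = (front.length : Int) + 3 := by ring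
  have e4 : ((front.length : Int) + 2) + 2 = (front.length : Int) + 4 := by ring
  have e1 : ((front.length : Int) + 2) + (-1) = (front.length : Int) + 1 := by ring
  have e0 : ((front.length : Int) + 2) + (-2) = (front.length : Int) + 0 := by ring
  have hset : PySem.List.pySetD (front ++ a :: b :: x :: (r ++ [0, 0])) ((front.length : Int) + 2) 1
      = front ++ a :: b :: (1 : Int) :: (r ++ [0, 0]) := by
    rw [PySem.List.pySetD_of_nonneg _ _ (by omega),
      show (((front.length : Int) + 2).toNat) = front.length + 2 by omega]
    exact set_shift2 front a b x 1 (r ++ [0, 0])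
  unfold stepA
  simp only [List.all_cons, List.all_nil, Bool.and_true, Bool.and_eq_true, beq_iff_eq,
    e3, e4, e1, e0, g2, g3, g4, g1, g0, List.getD_cons_zero, List.getD_cons_succ,
    getD_pad0, getD_pad1, hset]
  by_cases hx : x = 0 <;> by_cases h1 : r.headD 0 = 0 <;>
    by_cases h2 : (r.drop 1).headD 0 = 0 <;> by_cases hb : b = 0 <;> by_cases ha : a = 0 <;>
    simp [hx, hb, ha]

lemma A_loop : ∀ (rest front : List Int) (a b t : Int),
    ((PySem.List.pyRange ((front.length : Int) + 2) ((front.length : Int) + 2 + (rest.length : Int)) 1).foldl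
        stepA (front ++ a :: b :: (rest ++ [0, 0]), t)).2
      = t + gcount rest (if b ≠ 0 then 0 else if a ≠ 0 then 1 else 2) := by
  intro rest
  induction rest with
  | nil =>
    intro front a b t
    rw [show ((front.length : Int) + 2 + (([] : List Int).length : Int)) = (front.length : Int) + 2 by simp]
    rw [PySem.List.pyRange_one_eq_nil (by omega)]
    simp [gcount]
  | cons x r ih =>
    intro front a b t
    have hlt : (front.length : Int) + 2 < (front.length : Int) + 2 + ((x :: r).length : Int) := by
      have : (0 : Int) < ((x :: r).length : Int) := by simp
      omega
    rw [PySem.List.pyRange_one_cons hlt, List.foldl_cons,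
      show front ++ a :: b :: ((x :: r) ++ [0, 0]) = front ++ a :: b :: x :: (r ++ [0, 0]) by simp,
      stepA_eval]
    have hre : (front.length : Int) + 2 + ((x :: r).length : Int)
        = ((front ++ [a]).length : Int) + 2 + (r.length : Int) := by simp; ring
    have hstart : (front.length : Int) + 2 + 1 = ((front ++ [a]).length : Int) + 2 := by
      simp; ring
    by_cases hcond : x = 0 ∧ r.headD 0 = 0 ∧ (r.drop 1).headD 0 = 0 ∧ b = 0 ∧ a = 0
    · obtain ⟨hx, h1, h2, hb, ha⟩ := hcond
      subst hx; subst hb; subst ha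
      rw [if_pos ⟨rfl, h1, h2, rfl, rfl⟩,
        show front ++ (0:Int) :: (0:Int) :: (1:Int) :: (r ++ [0, 0])
          = (front ++ [(0:Int)]) ++ (0:Int) :: (1:Int) :: (r ++ [0, 0]) by simp,
        hre, hstart, ih (front ++ [0]) 0 1 (t + 1)]
      rw [show (if (1:Int) ≠ 0 then (0:Nat) else if (0:Int) ≠ 0 then 1 else 2) = 0 by norm_num,
        show (if (0:Int) ≠ 0 then (0:Nat) else if (0:Int) ≠ 0 then 1 else 2) = 2 by norm_num]
      simp only [gcount]
      rw [if_neg (show ¬ ((0:Int) ≠ 0) by norm_num), if_pos ⟨by norm_num, h1, h2⟩]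
      ring
    · rw [if_neg hcond,
        show front ++ a :: b :: x :: (r ++ [0, 0])
          = (front ++ [a]) ++ b :: x :: (r ++ [0, 0]) by simp,
        hre, hstart, ih (front ++ [a]) b x t]
      by_cases hx : x = 0
      · subst hx
        by_cases hb : b = 0
        · by_cases ha : a = 0
          · subst hb; subst ha
            have hnh : ¬ (r.headD 0 = 0 ∧ (r.drop 1).headD 0 = 0) :=
              fun h => hcond ⟨rfl, h.1, h.2, rfl, rfl⟩
            rw [show (if (0:Int) ≠ 0 then (0:Nat) else if (0:Int) ≠ 0 then 1 else 2) = 2 by norm_num]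
            simp only [gcount]
            rw [if_neg (show ¬ ((0:Int) ≠ 0) by norm_num),
              if_neg (fun h => hnh ⟨h.2.1, h.2.2⟩)]
            norm_num
          · subst hb
            simp [gcount, ha]
        · simp [gcount, hb]
      · simp only [gcount]
        rw [if_pos hx, if_pos hx]

lemma A_eq_gcount (lst : List Int) : maximum_seating lst = gcount lst 2 := by
  have hdef : maximum_seating lst
      = ((PySem.List.pyRange 2 (((([0, 0] ++ lst ++ [0, 0] : List Int)).length : Int) - 2) 1).foldl
          stepA (([0, 0] ++ lst ++ [0, 0] : List Int), 0)).2 := rfl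
  have hlen : ((([0, 0] ++ lst ++ [0, 0] : List Int)).length : Int) - 2
      = (([] : List Int).length : Int) + 2 + (lst.length : Int) := by simp; ring
  have hl : ([0, 0] ++ lst ++ [0, 0] : List Int) = [] ++ (0:Int) :: (0:Int) :: (lst ++ [0, 0]) := by simp
  rw [hdef, hlen, hl]
  have h := A_loop lst [] 0 0 0
  norm_num at h ⊢
  exact h

lemma head_rep (m : Nat) : (List.replicate m (0:Int)).headD 0 = 0 := by
  cases m <;> simp [List.replicate_succ]

lemma head_rep_drop (m : Nat) : ((List.replicate m (0:Int)).drop 1).headD 0 = 0 := by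
  match m with
  | 0 => simp
  | 1 => simp
  | (k+2) => simp [List.replicate_succ]

lemma grun_nil : ∀ (m d : Nat), d ≤ 2 →
    gcount (List.replicate m 0) d = (((m + d) / 3 : Nat) : Int) := by
  intro m
  induction m with
  | zero => intro d hd; simp [gcount]; omega
  | succ m ih =>
    intro d hd
    rw [List.replicate_succ]
    simp only [gcount]
    rw [if_neg (by simp)]
    by_cases h2 : 2 ≤ d
    · rw [if_pos ⟨h2, head_rep m, head_rep_drop m⟩, ih 0 (by omega)]
      have : d = 2 := by omega
      subst this
      push_cast
      omega
    · rw [if_neg (by tauto), ih (min (d + 1) 2) (by omega)]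
      congr 1
      omega

lemma grun_occ : ∀ (m : Nat) (d : Nat) (x : Int) (r : List Int), d ≤ 2 → x ≠ 0 →
    gcount (List.replicate m 0 ++ x :: r) d = (((m + d - 2) / 3 : Nat) : Int) + gcount r 0 := by
  intro m
  induction m with
  | zero =>
    intro d x r hd hx
    simp only [List.replicate, List.nil_append, gcount]
    rw [if_pos hx]
    rw [show (0 + d - 2) / 3 = 0 by omega]
    simp
  | succ m ih =>
    intro d x r hd hx
    rw [List.replicate_succ, List.cons_append]
    simp only [gcount]
    rw [if_neg (by simp)]
    match m with
    | 0 =>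
      rw [if_neg (by simp [hx])]
      rw [ih (min (d + 1) 2) x r (by omega) hx]
      congr 2
      omega
    | 1 =>
      have hdrop : ((List.replicate 1 (0:Int) ++ x :: r).drop 1).headD 0 = x := by simp
      rw [if_neg (by rw [hdrop]; tauto)]
      rw [ih (min (d + 1) 2) x r (by omega) hx]
      congr 2
      omega
    | (k+2) =>
      have hh1 : (List.replicate (k+2) (0:Int) ++ x :: r).headD 0 = 0 := by
        simp [List.replicate_succ]
      have hh2 : ((List.replicate (k+2) (0:Int) ++ x :: r).drop 1).headD 0 = 0 := by
        simp [List.replicate_succ]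
      by_cases h2 : 2 ≤ d
      · rw [if_pos ⟨h2, hh1, hh2⟩, ih 0 x r (by omega) hx]
        have : d = 2 := by omega
        subst this
        push_cast
        omega
      · rw [if_neg (by tauto), ih (min (d + 1) 2) x r (by omega) hx]
        congr 2
        omega

lemma fdiv3 (a : Int) : PySem.Int.floordiv (max a 0) 3 = (max a 0) / 3 :=
  PySem.Int.floordiv_eq_ediv_of_pos (by norm_num)

lemma B_main : ∀ (rest : List Int) (t : Int) (m : Nat) (b : Int), b = 0 ∨ b = 1 →
    (rest.foldl stepB (t, (m : Int), b)).1
        + PySem.Int.floordiv (max ((rest.foldl stepB (t, (m : Int), b)).2.1 + 2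
            - 2 * (rest.foldl stepB (t, (m : Int), b)).2.2) 0) 3
      = t + gcount (List.replicate m 0 ++ rest) (2 - 2 * b).toNat := by
  intro rest
  induction rest with
  | nil =>
    intro t m b hb
    simp only [List.foldl_nil, List.append_nil]
    rw [grun_nil m (2 - 2*b).toNat (by rcases hb with h | h <;> subst h <;> simp), fdiv3]
    rcases hb with h | h <;> subst h <;> push_cast <;> omega
  | cons x r ih =>
    intro t m b hb
    rw [List.foldl_cons]
    by_cases hx : x = 0
    · subst hx
      have hstep : stepB (t, (m : Int), b) 0 = (t, ((m + 1 : Nat) : Int), b) := by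
        simp [stepB]
      rw [hstep, ih t (m + 1) b hb]
      congr 2
      rw [List.replicate_succ' (n := m)]
      simp
    · have hstep : stepB (t, (m : Int), b) x
          = (t + PySem.Int.floordiv (max ((m : Int) - 2 * b) 0) 3, ((0 : Nat) : Int), 1) := by
        simp [stepB, hx]
      rw [hstep, ih _ 0 1 (Or.inr rfl)]
      rw [grun_occ m (2 - 2*b).toNat x r (by rcases hb with h | h <;> subst h <;> simp) hx]
      simp only [List.replicate, List.nil_append]
      rw [fdiv3]
      rcases hb with h | h <;> subst h <;> push_cast <;> omega

lemma B_eq_gcount (lst : List Int) : maximum_seating_alt lst = gcount lst 2 := by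
  have hdef : maximum_seating_alt lst
      = (lst.foldl stepB (0, 0, 0)).1
          + PySem.Int.floordiv (max ((lst.foldl stepB (0, 0, 0)).2.1 + 2
              - 2 * (lst.foldl stepB (0, 0, 0)).2.2) 0) 3 := rfl
  have h := B_main lst 0 0 0 (Or.inl rfl)
  simp only [Nat.cast_zero, List.replicate, List.nil_append] at h
  rw [hdef, h]
  norm_num
  rfl

-- ===== VERDICT (by name: the statement is the Claim_ definition above) =====
theorem maximum_seating_spec : Claim_equal_maximum_seating := by
  intro lst _
  unfold Spec_maximum_seating
  rw [A_eq_gcount, B_eq_gcount]
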